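-- pv_equiv track=rewrite | github.com/himanshunita009/Python-DSA | POTD/count-stable-subarrays.py | countStableSubarrays
-- ===== SOURCE A (Python) =====
-- def countStableSubarrays(nums: list[int], queries: list[list[int]]) -> list[int]:
--     n = len(nums)
--     nxt = [0]*n
--     nxt[-1] = n-1
--     for idx in range(n-2,-1,-1):
--         if nums[idx] <= nums[idx+1]:
--             nxt[idx] = nxt[idx+1]
--         else:
--             nxt[idx] = idx
--     ps_nxt = [0]*(n+1)
--     for idx in range(n):
--         length = nxt[idx]-idx+1
--         ps_nxt[idx+1] = ps_nxt[idx]+length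
--     def solve(l: int,r: int):
--         lo = l
--         hi = r+1
--         while lo < hi :
--             mid = (lo+hi)//2
--             if nxt[mid] > r:
--                 hi = mid
--             else:
--                 lo = mid+1
--         boundary = lo
--         partA = 0
--         if boundary > l:
--             partA = ps_nxt[boundary]-ps_nxt[l]
--         k = r - boundary+1
--         partB = 0
--         if k > 0:
--             partB = (r+1)*k - (boundary*k + (k*(k-1)//2))
--         return partA + partB
--     ans = []
--     for l,r in queries:
--         ans.append(solve(l,r))
--     return ans
-- ===== SOURCE B (Python) =====
-- def countStableSubarrays(nums: list[int], queries: list[list[int]]) -> list[int]: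
--     n = len(nums)
--     nxt = [0]*n
--     nxt[-1] = n-1
--     for idx in range(n-2,-1,-1):
--         if nums[idx] <= nums[idx+1]:
--             nxt[idx] = nxt[idx+1]
--         else:
--             nxt[idx] = idx
--     ans = []
--     for l, r in queries:
--         total = 0
--         for i in range(l, r+1):
--             total += min(nxt[i], r) - i + 1
--         ans.append(total)
--     return ans
-- ===== Notes on version B (the rewrite author's own statement) =====
-- stated objective: simpler
-- what changed: B keeps A's reverse-scan nxt array but drops the prefix-sum table, the per-query binary search and the closed-form arithmetic series, answering each query by a plain loop summing min(nxt[i], r) - i + 1 over i in [l, r].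
-- outside the precondition, e.g. on countStableSubarrays([1, 2], [[-1, 1]]): A returns [0], B returns [6]; on countStableSubarrays([1, 2], [[0, 2]]): A raises IndexError, B raises IndexError
import Mathlib
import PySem

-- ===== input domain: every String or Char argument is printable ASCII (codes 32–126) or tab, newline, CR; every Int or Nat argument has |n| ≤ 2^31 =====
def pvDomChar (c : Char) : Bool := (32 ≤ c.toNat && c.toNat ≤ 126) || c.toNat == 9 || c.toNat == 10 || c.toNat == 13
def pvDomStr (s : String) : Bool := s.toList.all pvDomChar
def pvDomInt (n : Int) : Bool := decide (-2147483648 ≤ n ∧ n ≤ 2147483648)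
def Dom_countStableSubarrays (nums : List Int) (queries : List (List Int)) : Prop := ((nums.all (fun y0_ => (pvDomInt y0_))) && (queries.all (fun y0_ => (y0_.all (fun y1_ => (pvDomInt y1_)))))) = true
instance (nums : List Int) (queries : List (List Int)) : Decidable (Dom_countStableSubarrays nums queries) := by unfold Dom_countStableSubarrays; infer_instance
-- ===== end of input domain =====

-- B drops A's prefix-sum table, per-query binary search and closed-form series for a plain per-query
-- summation loop over min(nxt[i], r) - i + 1 (objective: simpler). Return-value equivalence on Pre_.

-- list indexing xs[i]; exact for 0 ≤ i < len(xs), which Pre_ guarantees at every access both ports make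
def pyAt (xs : List Int) (i : Int) : Int := xs.getD i.toNat 0

-- ===== PORT A =====
-- the reverse scan building nxt: nxt[last] = n-1, nxt[idx] = nxt[idx+1] if nums[idx] <= nums[idx+1] else idx
-- (i is the absolute index of the head of the remaining suffix)
def buildNxt : Int → List Int → List Int
  | _, [] => []
  | i, [_] => [i]
  | i, x :: y :: rest =>
      let tail := buildNxt (i + 1) (y :: rest)
      (if x ≤ y then tail.getD 0 0 else i) :: tail

-- the forward scan building ps_nxt[1..]: ps_nxt[idx+1] = ps_nxt[idx] + (nxt[idx] - idx + 1)
def buildPs : Int → Int → List Int → List Int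
  | _, _, [] => []
  | i, acc, v :: rest =>
      let acc' := acc + (v - i + 1)
      acc' :: buildPs (i + 1) acc' rest

-- the while-loop of solve
def bsearchA (nxt : List Int) (r lo hi : Int) : Int :=
  if lo < hi then
    let mid := PySem.Int.floordiv (lo + hi) 2
    if pyAt nxt mid > r then bsearchA nxt r lo mid
    else bsearchA nxt r (mid + 1) hi
  else lo
termination_by (hi - lo).toNat
decreasing_by
  · have _h0 : lo < hi := by assumption
    have h2 : PySem.Int.floordiv (lo + hi) 2 < hi := by
      rw [PySem.Int.floordiv_lt_iff_lt_mul (by omega)]; omega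
    omega
  · have h1 := PySem.Int.floordiv_two_mid_bounds (le_of_lt (by assumption : lo < hi))
    omega

def solveA (nxt ps : List Int) (l r : Int) : Int :=
  let boundary := bsearchA nxt r l (r + 1)
  let partA := if boundary > l then pyAt ps boundary - pyAt ps l else 0
  let k := r - boundary + 1
  let partB := if k > 0 then (r + 1) * k - (boundary * k + PySem.Int.floordiv (k * (k - 1)) 2) else 0
  partA + partB

def countStableSubarrays (nums : List Int) (queries : List (List Int)) : List Int :=
  let nxt := buildNxt 0 nums
  let ps := 0 :: buildPs 0 0 nxt
  queries.map (fun q => solveA nxt ps (pyAt q 0) (pyAt q 1))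

-- ===== PORT B =====
-- B's inner loop: total += min(nxt[i], r) - i + 1 for i in range(l, r+1)
def sumLoopB (nxt : List Int) (r i : Int) : Int :=
  if i < r + 1 then (min (pyAt nxt i) r - i + 1) + sumLoopB nxt r (i + 1) else 0
termination_by (r + 1 - i).toNat
decreasing_by omega

def countStableSubarrays_alt (nums : List Int) (queries : List (List Int)) : List Int :=
  let nxt := buildNxt 0 nums
  queries.map (fun q => sumLoopB nxt (pyAt q 1) (pyAt q 0))

-- ===== PRECONDITION & SPEC =====
-- Pre_ excludes: empty nums (A raises IndexError building nxt; B raises identically), query rows whose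
-- length is not 2 (ValueError on unpacking), and queries with l <= r whose bounds leave [0, n): there A
-- either raises IndexError or returns a value that is accidental under Python's negative-index
-- wraparound, a corner no caller would specify (see cites).
def Pre_countStableSubarrays (nums : List Int) (queries : List (List Int)) : Prop :=
  nums ≠ [] ∧ ∀ q ∈ queries, q.length = 2 ∧
    (q.getD 1 0 < q.getD 0 0 ∨ (0 ≤ q.getD 0 0 ∧ q.getD 1 0 < (nums.length : Int)))
instance (nums : List Int) (queries : List (List Int)) : Decidable (Pre_countStableSubarrays nums queries) := by unfold Pre_countStableSubarrays; infer_instance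

def pvWitness_countStableSubarrays : List Int × List (List Int) := ([1, 2, 1], [[0, 2], [1, 1], [2, 0]])

def Spec_countStableSubarrays (nums : List Int) (queries : List (List Int)) (out : List Int) : Prop := out = countStableSubarrays_alt nums queries
instance (nums : List Int) (queries : List (List Int)) (out : List Int) : Decidable (Spec_countStableSubarrays nums queries out) := by unfold Spec_countStableSubarrays; infer_instance

-- ===== CLAIM (what is proved, stated in full; the proofs are below) =====
def Claim_equal_countStableSubarrays : Prop := ∀ (nums : List Int) (queries : List (List Int)), Dom_countStableSubarrays nums queries → Pre_countStableSubarrays nums queries → Spec_countStableSubarrays nums queries (countStableSubarrays nums queries)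

-- ===== LEMMAS AND PROOFS =====

lemma buildNxt_length (i : Int) (l : List Int) : (buildNxt i l).length = l.length := by
  induction i, l using buildNxt.induct <;> simp [buildNxt, *]

lemma buildNxt_bounds (i : Int) (l : List Int) :
    ∀ (k : Nat), k < l.length →
      i + k ≤ (buildNxt i l).getD k 0 ∧ (buildNxt i l).getD k 0 ≤ i + l.length - 1 := by
  induction i, l using buildNxt.induct with
  | case1 i => simp
  | case2 i x => intro k hk; simp at hk; subst hk; simp [buildNxt]
  | case3 i x y rest ih =>
      intro k hk
      match k with
      | 0 =>
          have h0 := ih 0 (by simp)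
          simp only [buildNxt, List.getD_cons_zero] at h0 ⊢
          split_ifs <;> [skip; skip] <;> simp at h0 ⊢ <;> omega
      | (k' + 1) =>
          have h0 := ih k' (by simp at hk ⊢; omega)
          simp only [buildNxt, List.getD_cons_succ] at h0 ⊢
          simp at h0 ⊢
          have hl : ((x :: y :: rest).length : Int) = (rest.length : Int) + 2 := by simp; omega
          push_cast at hl
          omega

lemma buildNxt_mono_step (i : Int) (l : List Int) :
    ∀ (k : Nat), k + 1 < l.length →
      (buildNxt i l).getD k 0 ≤ (buildNxt i l).getD (k + 1) 0 := by
  induction i, l using buildNxt.induct with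
  | case1 i => simp
  | case2 i x => intro k hk; simp at hk
  | case3 i x y rest ih =>
      intro k hk
      match k with
      | 0 =>
          have h0 := buildNxt_bounds (i + 1) (y :: rest) 0 (by simp)
          simp only [buildNxt, List.getD_cons_zero, List.getD_cons_succ]
          split_ifs with h
          · exact le_refl _
          · omega
      | (k' + 1) =>
          have h0 := ih k' (by simp at hk ⊢; omega)
          simp only [buildNxt, List.getD_cons_succ]
          exact h0

lemma buildNxt_mono (i : Int) (l : List Int) (k1 k2 : Nat) (h12 : k1 ≤ k2) (h2 : k2 < l.length) :
    (buildNxt i l).getD k1 0 ≤ (buildNxt i l).getD k2 0 := by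
  induction k2, h12 using Nat.le_induction with
  | base => exact le_refl _
  | succ k2 hk ih =>
      exact le_trans (ih (by omega)) (buildNxt_mono_step i l k2 (by omega))

lemma buildPs_step (l : List Int) :
    ∀ (i acc : Int) (k : Nat), k + 1 < l.length →
      (buildPs i acc l).getD (k + 1) 0
        = (buildPs i acc l).getD k 0 + (l.getD (k + 1) 0 - (i + k + 1) + 1) := by
  induction l with
  | nil => intro i acc k hk; simp at hk
  | cons v rest ih =>
      intro i acc k hk
      match k with
      | 0 =>
          match rest, hk with
          | w :: rest', _ =>
            simp only [buildPs, List.getD_cons_succ, List.getD_cons_zero]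
            push_cast
            ring
      | (k' + 1) =>
          have h := ih (i + 1) (acc + (v - i + 1)) k' (by simp at hk ⊢; omega)
          simp only [buildPs, List.getD_cons_succ]
          rw [h]
          push_cast
          ring

lemma psStep (nums : List Int) (j : Int) (h0 : 0 ≤ j) (hj : j < (nums.length : Int)) :
    pyAt (0 :: buildPs 0 0 (buildNxt 0 nums)) (j + 1)
      = pyAt (0 :: buildPs 0 0 (buildNxt 0 nums)) j + (pyAt (buildNxt 0 nums) j - j + 1) := by
  have hlen : (buildNxt 0 nums).length = nums.length := buildNxt_length 0 nums
  unfold pyAt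
  rw [show (j + 1).toNat = j.toNat + 1 from by omega]
  rw [List.getD_cons_succ]
  match hk : j.toNat with
  | 0 =>
      have hjz : j = 0 := by omega
      subst hjz
      match hnx : buildNxt 0 nums, hlen with
      | [], h => simp at h; omega
      | v :: rest, _ =>
        simp [buildPs]
  | (k' + 1) =>
      rw [List.getD_cons_succ]
      have hb := buildPs_step (buildNxt 0 nums) 0 0 k' (by omega)
      rw [hb]
      have : ((k' : Int) + 1) = j := by omega
      simp [this]

lemma bsearchA_spec (nxt : List Int) (n r : Int)
    (hmono : ∀ j1 j2 : Int, 0 ≤ j1 → j1 ≤ j2 → j2 < n → pyAt nxt j1 ≤ pyAt nxt j2)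
    (hr : r < n) :
    ∀ (d : Nat) (lo hi : Int), (hi - lo).toNat ≤ d → 0 ≤ lo → lo ≤ hi → hi ≤ r + 1 →
      lo ≤ bsearchA nxt r lo hi ∧ bsearchA nxt r lo hi ≤ hi ∧
      (∀ i, lo ≤ i → i < bsearchA nxt r lo hi → pyAt nxt i ≤ r) ∧
      (∀ i, bsearchA nxt r lo hi ≤ i → i < hi → r < pyAt nxt i) := by
  intro d
  induction d with
  | zero =>
      intro lo hi hd h0 hlh hhr
      have heq : hi = lo := by omega
      subst heq
      rw [bsearchA]
      simp only [lt_irrefl, if_false]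
      exact ⟨le_refl _, le_refl _, fun i h1 h2 => absurd (lt_of_le_of_lt h1 h2) (lt_irrefl _),
             fun i h1 h2 => absurd (lt_of_le_of_lt h1 h2) (lt_irrefl _)⟩
  | succ d ih =>
      intro lo hi hd h0 hlh hhr
      rw [bsearchA]
      by_cases hlt : lo < hi
      · simp only [hlt, if_true]
        have hmid := PySem.Int.floordiv_two_mid_bounds (le_of_lt hlt)
        have hmidlt : PySem.Int.floordiv (lo + hi) 2 < hi := by
          rw [PySem.Int.floordiv_lt_iff_lt_mul (by omega)]; omega
        set mid := PySem.Int.floordiv (lo + hi) 2 with hmiddef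
        by_cases hbr : pyAt nxt mid > r
        · simp only [hbr, if_true]
          obtain ⟨hb1, hb2, hb3, hb4⟩ := ih lo mid (by omega) h0 (by omega) (by omega)
          refine ⟨hb1, by omega, hb3, ?_⟩
          intro i hi1 hi2
          by_cases him : i < mid
          · exact hb4 i hi1 him
          · exact lt_of_lt_of_le hbr (hmono mid i (by omega) (by omega) (by omega))
        · simp only [hbr, if_false]
          obtain ⟨hb1, hb2, hb3, hb4⟩ := ih (mid + 1) hi (by omega) (by omega) (by omega) hhr
          refine ⟨by omega, hb2, ?_, hb4⟩
          intro i hi1 hi2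
          by_cases him : mid + 1 ≤ i
          · exact hb3 i him hi2
          · exact le_trans (hmono i mid (by omega) (by omega) (by omega)) (by omega)
      · simp only [hlt, if_false]
        exact ⟨le_refl _, hlh, fun i h1 h2 => absurd (lt_of_le_of_lt h1 h2) (lt_irrefl _),
               fun i h1 h2 => absurd (lt_of_le_of_lt h1 h2) hlt⟩

lemma lowSum (nxt ps : List Int) (n r b : Int) (hrn : r < n) (hb : b ≤ r + 1)
    (hps : ∀ j : Int, 0 ≤ j → j < n → pyAt ps (j + 1) = pyAt ps j + (pyAt nxt j - j + 1)) :
    ∀ (d : Nat) (i : Int), i + d = b → 0 ≤ i →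
      (∀ j, i ≤ j → j < b → pyAt nxt j ≤ r) →
      sumLoopB nxt r i = pyAt ps b - pyAt ps i + sumLoopB nxt r b := by
  intro d
  induction d with
  | zero =>
      intro i hd h0 _
      have : i = b := by omega
      subst this
      ring
  | succ d ih =>
      intro i hd h0 hlow
      have hib : i < b := by omega
      rw [sumLoopB]
      simp only [show i < r + 1 from by omega, if_true]
      have hmin : min (pyAt nxt i) r = pyAt nxt i := min_eq_left (hlow i (le_refl _) hib)
      have hstep := hps i h0 (by omega)
      have hrec := ih (i + 1) (by omega) (by omega) (fun j hj1 hj2 => hlow j (by omega) hj2)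
      rw [hmin, hrec]
      omega

lemma highSum (nxt : List Int) (r : Int) :
    ∀ (d : Nat) (i : Int), i + d = r + 1 →
      (∀ j, i ≤ j → j < r + 1 → r < pyAt nxt j) →
      sumLoopB nxt r i = (r + 1) * (d : Int) - (i * (d : Int) + PySem.Int.floordiv ((d : Int) * ((d : Int) - 1)) 2) := by
  intro d
  induction d with
  | zero =>
      intro i hd _
      rw [sumLoopB]
      simp only [show ¬ i < r + 1 from by omega, if_false]
      norm_num
  | succ d ih =>
      intro i hd hhigh
      have hir : i < r + 1 := by omega
      rw [sumLoopB]
      simp only [hir, if_true]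
      have hmin : min (pyAt nxt i) r = r := min_eq_right (le_of_lt (hhigh i (le_refl _) hir))
      have hrec := ih (i + 1) (by omega) (fun j hj1 hj2 => hhigh j (by omega) hj2)
      rw [hmin, hrec]
      -- evenness of consecutive products, to evaluate the two floor divisions exactly
      obtain ⟨t, ht⟩ : Even (((d : Int) - 1) * ((d : Int) - 1 + 1)) := Int.even_mul_succ_self _
      have hf1 : PySem.Int.floordiv ((d : Int) * ((d : Int) - 1)) 2 = t := by
        rw [PySem.Int.floordiv_eq_iff_of_pos (by omega)]
        constructor <;> nlinarith [ht]
      have hf2 : PySem.Int.floordiv (((d : Nat) + 1 : Int) * (((d : Nat) + 1 : Int) - 1)) 2 = t + (d : Int) := by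
        rw [PySem.Int.floordiv_eq_iff_of_pos (by omega)]
        constructor <;> nlinarith [ht]
      push_cast
      rw [hf1] at *
      push_cast at hf2
      rw [hf2]
      ring

lemma solve_eq (nums : List Int) (l r : Int)
    (hq : r < l ∨ (0 ≤ l ∧ r < (nums.length : Int))) :
    solveA (buildNxt 0 nums) (0 :: buildPs 0 0 (buildNxt 0 nums)) l r
      = sumLoopB (buildNxt 0 nums) r l := by
  by_cases hlr : r < l
  · have hbs : bsearchA (buildNxt 0 nums) r l (r + 1) = l := by
      rw [bsearchA]; simp [show ¬ l < r + 1 from by omega]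
    rw [sumLoopB]
    simp only [solveA, hbs, show ¬ l < r + 1 from by omega, if_false]
    simp [show ¬ (r - l + 1 > 0) from by omega]
  · obtain ⟨hl0, hrn⟩ : 0 ≤ l ∧ r < (nums.length : Int) := hq.resolve_left hlr
    have hmono : ∀ j1 j2 : Int, 0 ≤ j1 → j1 ≤ j2 → j2 < (nums.length : Int) →
        pyAt (buildNxt 0 nums) j1 ≤ pyAt (buildNxt 0 nums) j2 := by
      intro j1 j2 h1 h12 h2
      exact buildNxt_mono 0 nums j1.toNat j2.toNat (by omega) (by omega)
    obtain ⟨hb1, hb2, hb3, hb4⟩ :=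
      bsearchA_spec (buildNxt 0 nums) (nums.length : Int) r hmono hrn
        (r + 1 - l).toNat l (r + 1) (by omega) hl0 (by omega) (le_refl _)
    have hlowsum := lowSum (buildNxt 0 nums) (0 :: buildPs 0 0 (buildNxt 0 nums))
        (nums.length : Int) r (bsearchA (buildNxt 0 nums) r l (r + 1)) hrn hb2
        (fun j h1 h2 => psStep nums j h1 h2)
        (bsearchA (buildNxt 0 nums) r l (r + 1) - l).toNat l (by omega) hl0 hb3
    have hhighsum := highSum (buildNxt 0 nums) r
        (r + 1 - bsearchA (buildNxt 0 nums) r l (r + 1)).toNat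
        (bsearchA (buildNxt 0 nums) r l (r + 1)) (by omega) hb4
    have hc : ((r + 1 - bsearchA (buildNxt 0 nums) r l (r + 1)).toNat : Int)
        = r + 1 - bsearchA (buildNxt 0 nums) r l (r + 1) := by omega
    rw [hc] at hhighsum
    simp only [solveA]
    rw [hlowsum, hhighsum]
    rw [show r - bsearchA (buildNxt 0 nums) r l (r + 1) + 1
          = r + 1 - bsearchA (buildNxt 0 nums) r l (r + 1) from by ring]
    by_cases hbl : bsearchA (buildNxt 0 nums) r l (r + 1) > l
    · simp only [hbl, if_true]
      by_cases hk : r + 1 - bsearchA (buildNxt 0 nums) r l (r + 1) > 0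
      · simp only [hk, if_true]
      · have hbr : bsearchA (buildNxt 0 nums) r l (r + 1) = r + 1 := by omega
        simp only [hbr]
        have hz : PySem.Int.floordiv ((r + 1 - (r + 1)) * (r + 1 - (r + 1) - 1)) 2 = 0 := by
          rw [show (r + 1 - (r + 1)) * (r + 1 - (r + 1) - 1) = 0 from by ring]
          decide
        rw [hz]
        norm_num
        try ring_nf
    · have hbeq : bsearchA (buildNxt 0 nums) r l (r + 1) = l := by omega
      simp only [hbeq]
      by_cases hk : r + 1 - l > 0
      · simp only [hk, if_true]
        norm_num
        try ring_nf
      · have hlr1 : l = r + 1 := by omega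
        simp only [hlr1]
        have hz : PySem.Int.floordiv ((r + 1 - (r + 1)) * (r + 1 - (r + 1) - 1)) 2 = 0 := by
          rw [show (r + 1 - (r + 1)) * (r + 1 - (r + 1) - 1) = 0 from by ring]
          decide
        rw [hz]
        norm_num
        try ring_nf

-- ===== VERDICT (by name: the statement is the Claim_ definition above) =====
theorem countStableSubarrays_spec : Claim_equal_countStableSubarrays := by
  intro nums queries _ hpre
  unfold Spec_countStableSubarrays
  unfold countStableSubarrays countStableSubarrays_alt
  refine List.map_congr_left ?_
  intro q hq
  exact solve_eq nums (pyAt q 0) (pyAt q 1) (by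
    have h := (hpre.2 q hq).2
    simpa [pyAt] using h)
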